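-- pv_equiv track=rewrite | github.com/Chochanguk/codetree-TILs | 240916/고대 문명 유적 탐사/ancient-ruin-exploration.py | get_artifacts
-- ===== SOURCE A (Python) =====
-- from collections import deque
--
-- def get_artifacts(board):
--     """
--     보드에서 상하좌우로 3개 이상 연결된 유물들을 찾아 제거하고, 점수를 계산하는 함수.
--     :param board: 5x5 격자판
--     :return: 총 획득한 유물 점수
--     """
--     score = 0  # 획득할 점수를 저장할 변수
--     visited = [[False] * 5 for _ in range(5)]  # 방문 여부를 체크하는 배열
--     dy, dx = [0, 1, 0, -1], [1, 0, -1, 0]  # 상하좌우 탐색 방향 벡터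
--
--     # 5x5 보드의 모든 좌표를 탐색
--     for i in range(5):
--         for j in range(5):
--             if not visited[i][j]:  # 방문하지 않았고 유물이 있으면
--                 dq, trace = deque([(i, j)]), deque([(i, j)])  # BFS 탐색을 위한 큐
--                 visited[i][j] = True  # 현재 좌표 방문 처리
--
--                 # BFS 탐색으로 상하좌우로 같은 유물을 탐색
--                 while dq:
--                     cur_y, cur_x = dq.popleft()
--                     for d in range(4):  # 4방향 탐색
--                         ny, nx = cur_y + dy[d], cur_x + dx[d]
--                         if 0 <= ny < 5 and 0 <= nx < 5 and not visited[ny][nx] and board[ny][nx] == board[cur_y][cur_x]: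
--                             dq.append((ny, nx))
--                             trace.append((ny, nx))
--                             visited[ny][nx] = True  # 방문 처리
--
--                 # 3개 이상 연결된 유물 제거
--                 if len(trace) >= 3:
--                     score += len(trace)  # 연결된 유물의 개수만큼 점수 추가
--                     while trace:
--                         t = trace.popleft()  # 연결된 유물들을 제거
--                         board[t[0]][t[1]] = 0
--
--     return score  # 총 획득한 점수를 반환
-- ===== SOURCE B (Python) =====
-- def get_artifacts(board):
--     """Union-find over the 25 cells instead of per-seed BFS; same score, same
--     in-place zeroing of removed cells."""
--     parent = list(range(25))
--
--     def find(x):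
--         while parent[x] != x:
--             x = parent[x]
--         return x
--
--     for y in range(5):
--         for x in range(5):
--             c = 5 * y + x
--             if x + 1 < 5 and board[y][x] == board[y][x + 1]:
--                 ra, rb = find(c), find(c + 1)
--                 if ra != rb:
--                     if ra < rb:
--                         parent[rb] = ra
--                     else:
--                         parent[ra] = rb
--             if y + 1 < 5 and board[y][x] == board[y + 1][x]:
--                 ra, rb = find(c), find(c + 5)
--                 if ra != rb:
--                     if ra < rb:
--                         parent[rb] = ra
--                     else:
--                         parent[ra] = rb
--
--     sizes = [0] * 25
--     for c in range(25):
--         sizes[find(c)] += 1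
--
--     score = sum(s for s in sizes if s >= 3)
--     for c in range(25):
--         if sizes[find(c)] >= 3:
--             board[c // 5][c % 5] = 0
--     return score
-- ===== Notes on version B (the rewrite author's own statement) =====
-- stated objective: alternative
-- what changed: Replaced the per-seed BFS flood fill with a visited matrix by a union-find over the 25 cells (union right/down neighbors of equal value, then count cells per root and score roots of size >= 3); B performs the same in-place zeroing of removed cells.
import Mathlib
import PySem

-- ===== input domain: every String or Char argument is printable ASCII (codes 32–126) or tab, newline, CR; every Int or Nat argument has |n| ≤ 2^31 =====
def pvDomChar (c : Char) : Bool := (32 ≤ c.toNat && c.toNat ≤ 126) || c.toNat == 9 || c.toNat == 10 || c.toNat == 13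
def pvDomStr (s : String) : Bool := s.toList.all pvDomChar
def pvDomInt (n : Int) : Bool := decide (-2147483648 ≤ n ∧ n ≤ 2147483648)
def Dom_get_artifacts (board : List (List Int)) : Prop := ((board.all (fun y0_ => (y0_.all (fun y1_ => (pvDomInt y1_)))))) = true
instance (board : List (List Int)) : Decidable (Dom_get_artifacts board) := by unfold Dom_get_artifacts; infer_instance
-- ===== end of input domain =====

-- B replaces A's per-seed BFS flood fill by a union-find over the 25 cells; the in-place
-- zeroing of the caller's board (a side effect both Pythons share) does not affect the
-- returned score and is omitted from both ports' results, which are the score only.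

-- ===== PORT A =====
-- cells are numbered c = 5*i + j (row-major); board reads/writes go through pvBgetc /
-- pvBset, exact for c < 25 on boards with ≥ 5 rows whose first five rows have ≥ 5 entries (Pre_).
def pvBgetc (g : List (List Int)) (c : Nat) : Int := (g.getD (c / 5) []).getD (c % 5) 0

def pvBset (g : List (List Int)) (c : Nat) (v : Int) : List (List Int) :=
  g.set (c / 5) ((g.getD (c / 5) []).set (c % 5) v)

def pvDy : List Int := [0, 1, 0, -1]
def pvDx : List Int := [1, 0, -1, 0]

-- ny, nx = cur_y + dy[d], cur_x + dx[d]; the 0 <= ny < 5 and 0 <= nx < 5 bounds check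
def pvNbr (c : Nat) (d : Nat) : Option Nat :=
  let ny : Int := ((c / 5 : Nat) : Int) + pvDy.getD d 0
  let nx : Int := ((c % 5 : Nat) : Int) + pvDx.getD d 0
  if 0 ≤ ny ∧ ny < 5 ∧ 0 ≤ nx ∧ nx < 5 then some (ny * 5 + nx).toNat else none

-- number of unvisited cells (termination measure for the BFS while-loop)
def pvFalses (vis : List Bool) : Nat := vis.count false

-- the `for d in range(4)` body: append unvisited equal-valued neighbours to dq and trace
def pvExpand (g : List (List Int)) (c : Nat) (ds : List Nat) (dq trace : List Nat)
    (vis : List Bool) : List Nat × List Nat × List Bool :=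
  match ds with
  | [] => (dq, trace, vis)
  | d :: ds' =>
    match pvNbr c d with
    | none => pvExpand g c ds' dq trace vis
    | some n =>
      if vis.getD n true = false ∧ pvBgetc g n = pvBgetc g c then
        pvExpand g c ds' (dq ++ [n]) (trace ++ [n]) (vis.set n true)
      else pvExpand g c ds' dq trace vis

theorem pvCount_set_false {vis : List Bool} {n : Nat} (h : vis.getD n true = false) :
    (vis.set n true).count false + 1 = vis.count false := by
  induction vis generalizing n with
  | nil => simp [List.getD] at h
  | cons a t ih =>
    cases n with
    | zero => simp [List.getD] at h; subst h; simp
    | succ m =>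
      have := ih (n := m) (by simpa [List.getD] using h)
      simp [List.count_cons]
      omega

theorem pvExpand_measure (g : List (List Int)) (c : Nat) (ds : List Nat) (dq trace : List Nat)
    (vis : List Bool) :
    (pvExpand g c ds dq trace vis).1.length + pvFalses (pvExpand g c ds dq trace vis).2.2 ≤
      dq.length + pvFalses vis := by
  induction ds generalizing dq trace vis with
  | nil => simp [pvExpand]
  | cons d ds' ih =>
    simp only [pvExpand]
    cases pvNbr c d with
    | none => exact ih dq trace vis
    | some n =>
      by_cases h : vis.getD n true = false ∧ pvBgetc g n = pvBgetc g c
      · simp only [if_pos h]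
        have h2 := pvCount_set_false h.1
        have := ih (dq ++ [n]) (trace ++ [n]) (vis.set n true)
        simp [pvFalses] at *
        omega
      · simp only [if_neg h]
        exact ih dq trace vis

-- the `while dq:` BFS loop
def pvBfs (g : List (List Int)) (dq trace : List Nat) (vis : List Bool) :
    List Nat × List Bool :=
  match dq with
  | [] => (trace, vis)
  | c :: rest =>
    let r := pvExpand g c [0, 1, 2, 3] rest trace vis
    pvBfs g r.1 r.2.1 r.2.2
termination_by dq.length + pvFalses vis
decreasing_by
  have := pvExpand_measure g c [0, 1, 2, 3] rest trace vis
  simp only [List.length_cons]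
  omega

-- `board[t[0]][t[1]] = 0` for every cell of trace
def pvZero (g : List (List Int)) (trace : List Nat) : List (List Int) :=
  trace.foldl (fun g t => pvBset g t 0) g

-- the two nested `for i / for j` loops over the 25 cells, in row-major order
def pvOuterA (g : List (List Int)) (cells : List Nat) (vis : List Bool) (score : Int) : Int :=
  match cells with
  | [] => score
  | c :: cs =>
    if vis.getD c true = false then
      let r := pvBfs g [c] [c] (vis.set c true)
      if 3 ≤ r.1.length then
        pvOuterA (pvZero g r.1) cs r.2 (score + (r.1.length : Int))
      else pvOuterA g cs r.2 score
    else pvOuterA g cs vis score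

def get_artifacts (board : List (List Int)) : Int :=
  pvOuterA board (List.range 25) (List.replicate 25 false) 0

-- ===== PORT B =====
-- `find`: follow parent links to the root; parents built below always strictly decrease,
-- so fuel 25 makes the Python while-loop total (exact for the parents this port builds)
def pvFind (parent : List Nat) : Nat → Nat → Nat
  | 0, x => x
  | fuel + 1, x =>
    let p := parent.getD x x
    if p = x then x else pvFind parent fuel p

-- link the larger root under the smaller root
def pvUnion (parent : List Nat) (a b : Nat) : List Nat :=
  let ra := pvFind parent 25 a
  let rb := pvFind parent 25 b
  if ra = rb then parent
  else if ra < rb then parent.set rb ra else parent.set ra rb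

-- the double loop over y, x uniting each cell with its equal-valued right/down neighbour
def pvBuild (board : List (List Int)) : List Nat :=
  (List.range 25).foldl
    (fun par c =>
      let par1 :=
        if c % 5 + 1 < 5 ∧ pvBgetc board c = pvBgetc board (c + 1) then pvUnion par c (c + 1)
        else par
      if c / 5 + 1 < 5 ∧ pvBgetc board c = pvBgetc board (c + 5) then pvUnion par1 c (c + 5)
      else par1)
    (List.range 25)

-- `sizes[find(c)] += 1` for each cell
def pvSizes (parent : List Nat) : List Nat :=
  (List.range 25).foldl
    (fun s c =>
      let r := pvFind parent 25 c
      s.set r (s.getD r 0 + 1))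
    (List.replicate 25 0)

-- score = sum(s for s in sizes if s >= 3); the final zeroing loop only mutates the
-- argument, not the returned score, and is omitted here
def get_artifacts_alt (board : List (List Int)) : Int :=
  let parent := pvBuild board
  let sizes := pvSizes parent
  ((sizes.foldl (fun sc s => if 3 ≤ s then sc + s else sc) 0 : Nat) : Int)

-- ===== PRECONDITION & SPEC =====
-- Pre_ excludes exactly the boards on which the Python A raises IndexError:
-- fewer than 5 rows, or one of the first five rows with fewer than 5 entries.
def Pre_get_artifacts (board : List (List Int)) : Prop :=
  5 ≤ board.length ∧ ∀ row ∈ board.take 5, 5 ≤ row.length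
instance (board : List (List Int)) : Decidable (Pre_get_artifacts board) := by
  unfold Pre_get_artifacts; infer_instance

def pvWitness_get_artifacts : List (List Int) :=
  [[1, 1, 1, 2, 3], [4, 1, 2, 2, 3], [4, 5, 6, 7, 3], [4, 8, 9, 0, 0], [5, 8, 9, 0, 0]]

def Spec_get_artifacts (board : List (List Int)) (out : Int) : Prop := out = get_artifacts_alt board
instance (board : List (List Int)) (out : Int) : Decidable (Spec_get_artifacts board out) := by
  unfold Spec_get_artifacts; infer_instance

-- ===== CLAIM (what is proved, stated in full; the proofs are below) =====
def Claim_equal_get_artifacts : Prop := ∀ (board : List (List Int)), Dom_get_artifacts board → Pre_get_artifacts board → Spec_get_artifacts board (get_artifacts board)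

-- ===== LEMMAS AND PROOFS =====

-- ---------- generic getD/set helpers ----------
theorem pvGetD_set_self {α} (l : List α) (i : Nat) (a d : α) (h : i < l.length) :
    (l.set i a).getD i d = a := by
  simp [List.getD_eq_getElem?_getD, List.getElem?_set_self h]

theorem pvGetD_set_ne {α} (l : List α) (i j : Nat) (a d : α) (h : i ≠ j) :
    (l.set i a).getD j d = l.getD j d := by
  simp [List.getD_eq_getElem?_getD, List.getElem?_set_ne h]

theorem pvSet_true_mono {vis : List Bool} {n x : Nat}
    (h : (vis.set n true).getD x true = false) : vis.getD x true = false := by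
  by_cases hx : n = x
  · subst hx
    by_cases hl : n < vis.length
    · rw [pvGetD_set_self _ _ _ _ hl] at h; exact absurd h (by simp)
    · rwa [List.set_eq_of_length_le (by omega)] at h
  · rwa [pvGetD_set_ne _ _ _ _ _ hx] at h

-- ---------- the adjacency graph of equal-valued orthogonal neighbours ----------
def pvAdj (g : List (List Int)) (a b : Nat) : Prop :=
  a < 25 ∧ b < 25 ∧ pvBgetc g a = pvBgetc g b ∧
    ((b = a + 1 ∧ a % 5 < 4) ∨ (a = b + 1 ∧ b % 5 < 4) ∨
     (b = a + 5 ∧ a / 5 < 4) ∨ (a = b + 5 ∧ b / 5 < 4))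

def pvConn (g : List (List Int)) : Nat → Nat → Prop := Relation.ReflTransGen (pvAdj g)

theorem pvAdj_symm {g : List (List Int)} : Symmetric (pvAdj g) := by
  rintro a b ⟨ha, hb, hv, hs⟩
  exact ⟨hb, ha, hv.symm, by tauto⟩

theorem pvConn_symm {g : List (List Int)} {a b : Nat} (h : pvConn g a b) : pvConn g b a :=
  Relation.ReflTransGen.symmetric pvAdj_symm h

theorem pvConn_trans {g : List (List Int)} {a b c : Nat}
    (h1 : pvConn g a b) (h2 : pvConn g b c) : pvConn g a c := h1.trans h2

-- ---------- union-find theory ----------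
def pvInv (g : List (List Int)) (par : List Nat) : Prop :=
  par.length = 25 ∧ ∀ x, x < 25 → par.getD x x ≤ x ∧ pvConn g (par.getD x x) x

def pvDec (par : List Nat) : Prop := ∀ x, x < 25 → par.getD x x ≤ x

theorem pvFind_succ (par : List Nat) (f x : Nat) :
    pvFind par (f + 1) x = if par.getD x x = x then x else pvFind par f (par.getD x x) := rfl

theorem pvFind_fuel_irrel {par : List Nat} (hd : pvDec par) :
    ∀ fuel fuel' x, x < fuel → x < fuel' → x < 25 →
      pvFind par fuel x = pvFind par fuel' x := by
  intro fuel
  induction fuel with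
  | zero => omega
  | succ f ih =>
    intro fuel' x hxf hxf' hx25
    cases fuel' with
    | zero => omega
    | succ f' =>
      rw [pvFind_succ, pvFind_succ]
      by_cases hp : par.getD x x = x
      · rw [if_pos hp, if_pos hp]
      · have hle := hd x hx25
        have hlt : par.getD x x < x := by omega
        simp only [if_neg hp]
        exact ih f' _ (by omega) (by omega) (by omega)

theorem pvFind_fix {par : List Nat} {x : Nat} (h : par.getD x x = x) :
    ∀ fuel, pvFind par fuel x = x := by
  intro fuel; cases fuel with
  | zero => rfl
  | succ f => rw [pvFind_succ, if_pos h]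

theorem pvFind_spec {g : List (List Int)} {par : List Nat} (hInv : pvInv g par) :
    ∀ fuel x, x < fuel → x < 25 →
      pvFind par fuel x ≤ x ∧
      par.getD (pvFind par fuel x) (pvFind par fuel x) = pvFind par fuel x ∧
      pvConn g (pvFind par fuel x) x := by
  intro fuel
  induction fuel with
  | zero => omega
  | succ f ih =>
    intro x hxf hx25
    rw [pvFind_succ]
    by_cases hp : par.getD x x = x
    · rw [if_pos hp]
      exact ⟨le_refl x, hp, Relation.ReflTransGen.refl⟩
    · have hle := (hInv.2 x hx25).1
      have hconn := (hInv.2 x hx25).2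
      have hlt : par.getD x x < x := by omega
      simp only [if_neg hp]
      obtain ⟨h1, h2, h3⟩ := ih (par.getD x x) (by omega) (by omega)
      exact ⟨by omega, h2, pvConn_trans h3 hconn⟩

theorem pvRt_spec {g : List (List Int)} {par : List Nat} (hInv : pvInv g par) {x : Nat}
    (hx : x < 25) :
    pvFind par 25 x ≤ x ∧
    par.getD (pvFind par 25 x) (pvFind par 25 x) = pvFind par 25 x ∧
    pvConn g (pvFind par 25 x) x := pvFind_spec hInv 25 x hx hx

theorem pvRt_unroll {par : List Nat} (hd : pvDec par) {x : Nat} (hx : x < 25)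
    (hp : par.getD x x ≠ x) : pvFind par 25 x = pvFind par 25 (par.getD x x) := by
  have hlt : par.getD x x < x := by have := hd x hx; omega
  have h1 : pvFind par 25 x = pvFind par (x + 1) x :=
    pvFind_fuel_irrel hd 25 (x + 1) x hx (by omega) hx
  rw [h1, pvFind_succ, if_neg hp]
  exact pvFind_fuel_irrel hd x 25 _ (by omega) (by omega) (by omega)

-- characterization of find after linking root hi under root lo
theorem pvRt_set {g : List (List Int)} {par : List Nat} (hInv : pvInv g par) {lo hi : Nat}
    (hlohi : lo < hi) (hhi : hi < 25) (hlo25 : lo < 25)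
    (hloR : par.getD lo lo = lo) (hhiR : par.getD hi hi = hi) :
    ∀ x, x < 25 →
      pvFind (par.set hi lo) 25 x =
        (if pvFind par 25 x = hi then lo else pvFind par 25 x) := by
  have hlen := hInv.1
  have hget : ∀ y, (par.set hi lo).getD y y = (if y = hi then lo else par.getD y y) := by
    intro y
    by_cases hy : y = hi
    · subst hy; rw [if_pos rfl]; exact pvGetD_set_self _ _ _ _ (by omega)
    · rw [if_neg hy]; exact pvGetD_set_ne _ _ _ _ _ (fun h => hy h.symm)
  have hd : pvDec par := fun y hy => (hInv.2 y hy).1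
  have hd' : pvDec (par.set hi lo) := by
    intro y hy
    rw [hget y]
    by_cases hy' : y = hi
    · simp [hy']; omega
    · simp [hy']; exact hd y hy
  intro x
  induction x using Nat.strong_induction_on with
  | _ x ihx =>
    intro hx25
    by_cases hxhi : x = hi
    · subst hxhi
      have hrx : pvFind par 25 x = x := pvFind_fix hhiR 25
      rw [hrx, if_pos rfl]
      have hp' : (par.set x lo).getD x x = lo := by
        rw [hget x, if_pos rfl]
      have hne : (par.set x lo).getD x x ≠ x := by rw [hp']; omega
      rw [pvRt_unroll hd' hx25 hne, hp']
      have hloR' : (par.set x lo).getD lo lo = lo := by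
        rw [hget lo, if_neg (by omega)]; exact hloR
      exact pvFind_fix hloR' 25
    · have hgx : (par.set hi lo).getD x x = par.getD x x := by
        rw [hget x, if_neg hxhi]
      by_cases hpx : par.getD x x = x
      · have h1 : pvFind (par.set hi lo) 25 x = x := pvFind_fix (by rw [hgx]; exact hpx) 25
        have h2 : pvFind par 25 x = x := pvFind_fix hpx 25
        rw [h1, h2, if_neg hxhi]
      · have hplt : par.getD x x < x := by have := hd x hx25; omega
        have h1 : pvFind (par.set hi lo) 25 x = pvFind (par.set hi lo) 25 (par.getD x x) := by
          have := pvRt_unroll hd' hx25 (by rw [hgx]; exact hpx)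
          rwa [hgx] at this
        rw [h1, ihx _ hplt (by omega), ← pvRt_unroll hd hx25 hpx]

-- ---------- union and build ----------
theorem pvParSet_getD {par : List Nat} (hlen : par.length = 25) {hi : Nat} (hhi : hi < 25)
    (lo : Nat) : ∀ y, (par.set hi lo).getD y y = (if y = hi then lo else par.getD y y) := by
  intro y
  by_cases hy : y = hi
  · subst hy; rw [if_pos rfl]; exact pvGetD_set_self _ _ _ _ (by omega)
  · rw [if_neg hy]; exact pvGetD_set_ne _ _ _ _ _ (fun h => hy h.symm)

theorem pvUnion_spec {g : List (List Int)} {par : List Nat} {a b : Nat}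
    (hInv : pvInv g par) (ha : a < 25) (hb : b < 25) (hconn : pvConn g a b) :
    pvInv g (pvUnion par a b) ∧
    (∀ x y, x < 25 → y < 25 → pvFind par 25 x = pvFind par 25 y →
      pvFind (pvUnion par a b) 25 x = pvFind (pvUnion par a b) 25 y) ∧
    pvFind (pvUnion par a b) 25 a = pvFind (pvUnion par a b) 25 b := by
  have hlen := hInv.1
  obtain ⟨hraa, hraR, hraC⟩ := pvRt_spec hInv ha
  obtain ⟨hrbb, hrbR, hrbC⟩ := pvRt_spec hInv hb
  set ra := pvFind par 25 a with hra
  set rb := pvFind par 25 b with hrb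
  have hra25 : ra < 25 := by omega
  have hrb25 : rb < 25 := by omega
  have hcab : pvConn g ra rb :=
    pvConn_trans hraC (pvConn_trans hconn (pvConn_symm hrbC))
  have hstep : ∀ (lo hi : Nat), lo < hi → hi < 25 → lo < 25 →
      par.getD lo lo = lo → par.getD hi hi = hi → pvConn g lo hi →
      pvInv g (par.set hi lo) ∧
      (∀ x y, x < 25 → y < 25 → pvFind par 25 x = pvFind par 25 y →
        pvFind (par.set hi lo) 25 x = pvFind (par.set hi lo) 25 y) := by
    intro lo hi hlh hh25 hl25 hloR hhiR hc
    have hset := pvRt_set hInv hlh hh25 hl25 hloR hhiR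
    refine ⟨⟨by simp [hlen], ?_⟩, ?_⟩
    · intro x hx
      rw [pvParSet_getD hlen hh25 lo x]
      by_cases hxh : x = hi
      · subst hxh
        rw [if_pos rfl]
        exact ⟨by omega, hc⟩
      · rw [if_neg hxh]
        exact (hInv.2 x hx)
    · intro x y hx hy hxy
      rw [hset x hx, hset y hy, hxy]
  unfold pvUnion
  rw [← hra, ← hrb]
  by_cases heq : ra = rb
  · rw [if_pos heq]
    exact ⟨hInv, fun x y _ _ h => h, by rw [← hra, ← hrb]; exact heq⟩
  · rw [if_neg heq]
    by_cases hlt : ra < rb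
    · rw [if_pos hlt]
      obtain ⟨hi1, hp1⟩ := hstep ra rb hlt hrb25 hra25 hraR hrbR hcab
      have hset := pvRt_set hInv hlt hrb25 hra25 hraR hrbR
      refine ⟨hi1, hp1, ?_⟩
      rw [hset a ha, hset b hb, ← hra, ← hrb]
      simp [heq]
    · have hlt' : rb < ra := by omega
      rw [if_neg hlt]
      obtain ⟨hi1, hp1⟩ := hstep rb ra hlt' hra25 hrb25 hrbR hraR (pvConn_symm hcab)
      have hset := pvRt_set hInv hlt' hra25 hrb25 hrbR hraR
      refine ⟨hi1, hp1, ?_⟩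
      rw [hset a ha, hset b hb, ← hra, ← hrb]
      have hne : rb ≠ ra := fun h => heq h.symm
      simp [hne]

def pvStep (g : List (List Int)) (par : List Nat) (c : Nat) : List Nat :=
  let par1 :=
    if c % 5 + 1 < 5 ∧ pvBgetc g c = pvBgetc g (c + 1) then pvUnion par c (c + 1) else par
  if c / 5 + 1 < 5 ∧ pvBgetc g c = pvBgetc g (c + 5) then pvUnion par1 c (c + 5) else par1

theorem pvBuild_eq (g : List (List Int)) :
    pvBuild g = (List.range 25).foldl (pvStep g) (List.range 25) := rfl

theorem pvAdj_right {g : List (List Int)} {c : Nat} (hc : c < 25) (hm : c % 5 + 1 < 5)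
    (hv : pvBgetc g c = pvBgetc g (c + 1)) : pvAdj g c (c + 1) :=
  ⟨hc, by omega, hv, Or.inl ⟨rfl, by omega⟩⟩

theorem pvAdj_down {g : List (List Int)} {c : Nat} (hc : c < 25) (hm : c / 5 + 1 < 5)
    (hv : pvBgetc g c = pvBgetc g (c + 5)) : pvAdj g c (c + 5) :=
  ⟨hc, by omega, hv, Or.inr (Or.inr (Or.inl ⟨rfl, by omega⟩))⟩

theorem pvStep_spec {g : List (List Int)} {par : List Nat} {c : Nat}
    (hInv : pvInv g par) (hc : c < 25) :
    pvInv g (pvStep g par c) ∧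
    (∀ x y, x < 25 → y < 25 → pvFind par 25 x = pvFind par 25 y →
      pvFind (pvStep g par c) 25 x = pvFind (pvStep g par c) 25 y) ∧
    (pvAdj g c (c + 1) → pvFind (pvStep g par c) 25 c = pvFind (pvStep g par c) 25 (c + 1)) ∧
    (pvAdj g c (c + 5) → pvFind (pvStep g par c) 25 c = pvFind (pvStep g par c) 25 (c + 5)) := by
  unfold pvStep
  by_cases h1 : c % 5 + 1 < 5 ∧ pvBgetc g c = pvBgetc g (c + 1)
  · rw [if_pos h1]
    have hadj1 : pvAdj g c (c + 1) := pvAdj_right hc h1.1 h1.2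
    obtain ⟨hI1, hP1, hM1⟩ :=
      pvUnion_spec hInv hc (by omega) (Relation.ReflTransGen.single hadj1)
    by_cases h2 : c / 5 + 1 < 5 ∧ pvBgetc g c = pvBgetc g (c + 5)
    · rw [if_pos h2]
      have hadj2 : pvAdj g c (c + 5) := pvAdj_down hc h2.1 h2.2
      obtain ⟨hI2, hP2, hM2⟩ :=
        pvUnion_spec hI1 hc (by omega) (Relation.ReflTransGen.single hadj2)
      exact ⟨hI2, fun x y hx hy h => hP2 x y hx hy (hP1 x y hx hy h),
        fun _ => hP2 c (c + 1) hc (by omega) hM1, fun _ => hM2⟩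
    · rw [if_neg h2]
      refine ⟨hI1, hP1, fun _ => hM1, fun hadj2 => absurd ?_ h2⟩
      obtain ⟨_, h25, hv, hs⟩ := hadj2
      refine ⟨by omega, hv⟩
  · rw [if_neg h1]
    by_cases h2 : c / 5 + 1 < 5 ∧ pvBgetc g c = pvBgetc g (c + 5)
    · rw [if_pos h2]
      have hadj2 : pvAdj g c (c + 5) := pvAdj_down hc h2.1 h2.2
      obtain ⟨hI2, hP2, hM2⟩ :=
        pvUnion_spec hInv hc (by omega) (Relation.ReflTransGen.single hadj2)
      refine ⟨hI2, hP2, fun hadj1 => absurd ?_ h1, fun _ => hM2⟩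
      obtain ⟨_, h25, hv, hs⟩ := hadj1
      have hm : c % 5 + 1 < 5 := by
        rcases hs with ⟨_, hm⟩ | ⟨h, _⟩ | ⟨h, _⟩ | ⟨h, _⟩ <;> omega
      exact ⟨hm, hv⟩
    · rw [if_neg h2]
      refine ⟨hInv, fun x y _ _ h => h, fun hadj1 => absurd ?_ h1, fun hadj2 => absurd ?_ h2⟩
      · obtain ⟨_, h25, hv, hs⟩ := hadj1
        have hm : c % 5 + 1 < 5 := by
          rcases hs with ⟨_, hm⟩ | ⟨h, _⟩ | ⟨h, _⟩ | ⟨h, _⟩ <;> omega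
        exact ⟨hm, hv⟩
      · obtain ⟨_, h25, hv, hs⟩ := hadj2
        refine ⟨by omega, hv⟩

theorem pvBuild_prefix (g : List (List Int)) :
    ∀ k, k ≤ 25 →
      pvInv g ((List.range k).foldl (pvStep g) (List.range 25)) ∧
      (∀ a, a < k →
        (pvAdj g a (a + 1) →
          pvFind ((List.range k).foldl (pvStep g) (List.range 25)) 25 a =
          pvFind ((List.range k).foldl (pvStep g) (List.range 25)) 25 (a + 1)) ∧
        (pvAdj g a (a + 5) →
          pvFind ((List.range k).foldl (pvStep g) (List.range 25)) 25 a =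
          pvFind ((List.range k).foldl (pvStep g) (List.range 25)) 25 (a + 5))) := by
  intro k
  induction k with
  | zero =>
    intro _
    simp only [List.range_zero, List.foldl_nil]
    constructor
    · constructor
      · simp
      · intro x hx
        have : (List.range 25).getD x x = x := by
          rw [List.getD_eq_getElem?_getD, List.getElem?_range hx]
          rfl
        rw [this]
        exact ⟨le_refl x, Relation.ReflTransGen.refl⟩
    · intro a ha; omega
  | succ k ih =>
    intro hk
    obtain ⟨hInv, hedges⟩ := ih (by omega)
    rw [List.range_succ (n := k), List.foldl_append]
    simp only [List.foldl_cons, List.foldl_nil]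
    obtain ⟨hI, hP, hE1, hE5⟩ := pvStep_spec (c := k) hInv (by omega)
    refine ⟨hI, ?_⟩
    intro a ha
    by_cases hak : a = k
    · subst hak; exact ⟨hE1, hE5⟩
    · have ha' : a < k := by omega
      obtain ⟨he1, he5⟩ := hedges a ha'
      constructor
      · intro hadj
        exact hP a (a + 1) hadj.1 hadj.2.1 (he1 hadj)
      · intro hadj
        exact hP a (a + 5) hadj.1 hadj.2.1 (he5 hadj)

theorem pvBuild_inv (g : List (List Int)) : pvInv g (pvBuild g) := by
  rw [pvBuild_eq]; exact (pvBuild_prefix g 25 (le_refl 25)).1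

theorem pvAdj_root {g : List (List Int)} {a b : Nat} (h : pvAdj g a b) :
    pvFind (pvBuild g) 25 a = pvFind (pvBuild g) 25 b := by
  have hedges := (pvBuild_prefix g 25 (le_refl 25)).2
  have ha := h.1
  have hb := h.2.1
  rw [pvBuild_eq]
  rcases h.2.2.2 with ⟨hb1, _⟩ | ⟨ha1, _⟩ | ⟨hb5, _⟩ | ⟨ha5, _⟩
  · subst hb1; exact (hedges a ha).1 h
  · subst ha1; exact ((hedges b hb).1 (pvAdj_symm h)).symm
  · subst hb5; exact (hedges a ha).2 h
  · subst ha5; exact ((hedges b hb).2 (pvAdj_symm h)).symm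

theorem pvConn_iff_root {g : List (List Int)} {x y : Nat} (hx : x < 25) (hy : y < 25) :
    pvConn g x y ↔ pvFind (pvBuild g) 25 x = pvFind (pvBuild g) 25 y := by
  constructor
  · intro h
    clear hy
    induction h with
    | refl => rfl
    | tail _ hadj ih => rw [ih]; exact pvAdj_root hadj
  · intro h
    have hInv := pvBuild_inv g
    have h1 := (pvRt_spec hInv hx).2.2
    have h2 := (pvRt_spec hInv hy).2.2
    rw [h] at h1
    exact pvConn_trans (pvConn_symm h1) h2

theorem pvRoot_le {g : List (List Int)} {x : Nat} (hx : x < 25) :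
    pvFind (pvBuild g) 25 x ≤ x := (pvRt_spec (pvBuild_inv g) hx).1

theorem pvRoot_idem {g : List (List Int)} {x : Nat} (hx : x < 25) :
    pvFind (pvBuild g) 25 (pvFind (pvBuild g) 25 x) = pvFind (pvBuild g) 25 x :=
  pvFind_fix (pvRt_spec (pvBuild_inv g) hx).2.1 25

-- ---------- component sizes and the B-side score ----------
def pvRoot (g : List (List Int)) (x : Nat) : Nat := pvFind (pvBuild g) 25 x

def pvSizeOf (g : List (List Int)) (r : Nat) : Nat :=
  ((List.range 25).filter (fun c => pvRoot g c = r)).length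

theorem pvRoot_lt25 {g : List (List Int)} {x : Nat} (hx : x < 25) : pvRoot g x < 25 := by
  have := pvRoot_le (g := g) hx; unfold pvRoot; omega

theorem pvRoot_idem' {g : List (List Int)} {x : Nat} (hx : x < 25) :
    pvRoot g (pvRoot g x) = pvRoot g x := pvRoot_idem hx

theorem pvSizeOf_nonroot {g : List (List Int)} {r : Nat} (hr : r < 25)
    (h : pvRoot g r ≠ r) : pvSizeOf g r = 0 := by
  unfold pvSizeOf
  rw [List.length_eq_zero_iff, List.filter_eq_nil_iff]
  intro c hc
  simp only [decide_eq_true_eq]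
  intro hcr
  exact h (by rw [← hcr, pvRoot_idem' (by simpa using hc), hcr])

theorem pvFoldl_congr {α β : Type} (l : List α) (f f' : β → α → β) (z : β)
    (h : ∀ sc r, r ∈ l → f sc r = f' sc r) : l.foldl f z = l.foldl f' z := by
  induction l generalizing z with
  | nil => rfl
  | cons a t ih =>
    simp only [List.foldl_cons]
    rw [h z a (by simp)]
    exact ih _ (fun sc r hr => h sc r (by simp [hr]))

theorem pvSizes_spec (g : List (List Int)) :
    ∀ k, k ≤ 25 →
      ((List.range k).foldl
        (fun s c =>
          let r := pvFind (pvBuild g) 25 c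
          s.set r (s.getD r 0 + 1)) (List.replicate 25 0)).length = 25 ∧
      ∀ r, r < 25 →
        ((List.range k).foldl
          (fun s c =>
            let r := pvFind (pvBuild g) 25 c
            s.set r (s.getD r 0 + 1)) (List.replicate 25 0)).getD r 0 =
        ((List.range k).filter (fun c => pvRoot g c = r)).length := by
  intro k
  induction k with
  | zero =>
    intro _
    simp only [List.range_zero, List.foldl_nil, List.filter_nil, List.length_nil]
    refine ⟨by simp, ?_⟩
    intro r hr
    rw [List.getD_eq_getElem?_getD, List.getElem?_replicate]
    simp [hr]
  | succ k ih =>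
    intro hk
    obtain ⟨hlen, hval⟩ := ih (by omega)
    rw [List.range_succ (n := k), List.foldl_append]
    simp only [List.filter_append, List.foldl_cons, List.foldl_nil]
    set s := (List.range k).foldl
        (fun s c =>
          let r := pvFind (pvBuild g) 25 c
          s.set r (s.getD r 0 + 1)) (List.replicate 25 0) with hs
    have hr0 : pvRoot g k < 25 := pvRoot_lt25 (by omega)
    refine ⟨by simpa using hlen, ?_⟩
    intro r hr
    by_cases hrk : r = pvFind (pvBuild g) 25 k
    · subst hrk
      rw [pvGetD_set_self _ _ _ _ (by rw [hlen]; exact hr0)]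
      rw [hval _ hr]
      have : List.filter (fun c => decide (pvRoot g c = pvFind (pvBuild g) 25 k)) [k] = [k] := by
        simp [pvRoot]
      rw [this, List.length_append]
      simp
    · rw [pvGetD_set_ne _ _ _ _ _ (fun h => hrk h.symm)]
      rw [hval _ hr]
      have : List.filter (fun c => decide (pvRoot g c = r)) [k] = [] := by
        simp [pvRoot]
        exact fun h => hrk h.symm
      rw [this, List.length_append]
      simp

theorem pvList_eq_map_getD (l : List Nat) (h : l.length = 25) :
    l = (List.range 25).map (fun r => l.getD r 0) := by
  apply List.ext_getElem
  · simp [h]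
  · intro i h1 h2
    simp only [List.getElem_map, List.getElem_range]
    rw [List.getD_eq_getElem l 0 (by omega)]

theorem pvAlt_eq (g : List (List Int)) :
    get_artifacts_alt g =
      (((List.range 25).foldl
        (fun sc r => if 3 ≤ pvSizeOf g r then sc + pvSizeOf g r else sc) 0 : Nat) : Int) := by
  simp only [get_artifacts_alt]
  rw [Nat.cast_inj]
  obtain ⟨hlen, hval⟩ := pvSizes_spec g 25 (le_refl 25)
  have hsz : pvSizes (pvBuild g) =
      (List.range 25).foldl
        (fun s c =>
          let r := pvFind (pvBuild g) 25 c
          s.set r (s.getD r 0 + 1)) (List.replicate 25 0) := rfl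
  rw [hsz, pvList_eq_map_getD _ hlen, List.foldl_map]
  exact pvFoldl_congr _ _ _ _ (fun sc r hr => by
    rw [hval r (by simpa using hr)]; rfl)

-- ---------- neighbour enumeration ----------
theorem pvNbr_0 {c : Nat} (hc : c < 25) :
    pvNbr c 0 = if c % 5 < 4 then some (c + 1) else none := by
  simp only [pvNbr, pvDy, pvDx, List.getD_cons_zero]
  split_ifs with h1 h2 h2 <;> first
    | (simp only [Option.some.injEq]; omega)
    | rfl
    | omega

theorem pvNbr_1 {c : Nat} (hc : c < 25) :
    pvNbr c 1 = if c / 5 < 4 then some (c + 5) else none := by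
  simp only [pvNbr, pvDy, pvDx, List.getD_cons_succ, List.getD_cons_zero]
  split_ifs with h1 h2 h2 <;> first
    | (simp only [Option.some.injEq]; omega)
    | rfl
    | omega

theorem pvNbr_2 {c : Nat} (hc : c < 25) :
    pvNbr c 2 = if 1 ≤ c % 5 then some (c - 1) else none := by
  simp only [pvNbr, pvDy, pvDx, List.getD_cons_succ, List.getD_cons_zero]
  split_ifs with h1 h2 h2 <;> first
    | (simp only [Option.some.injEq]; omega)
    | rfl
    | omega

theorem pvNbr_3 {c : Nat} (hc : c < 25) :
    pvNbr c 3 = if 5 ≤ c then some (c - 5) else none := by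
  simp only [pvNbr, pvDy, pvDx, List.getD_cons_succ, List.getD_cons_zero]
  split_ifs with h1 h2 h2 <;> first
    | (simp only [Option.some.injEq]; omega)
    | rfl
    | omega

theorem pvNbr_shape {c d n : Nat} (hc : c < 25) (hd : d < 4) (h : pvNbr c d = some n) :
    n < 25 ∧
      ((n = c + 1 ∧ c % 5 < 4) ∨ (c = n + 1 ∧ n % 5 < 4) ∨
       (n = c + 5 ∧ c / 5 < 4) ∨ (c = n + 5 ∧ n / 5 < 4)) := by
  interval_cases d
  · rw [pvNbr_0 hc] at h
    split_ifs at h with h1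
    · simp only [Option.some.injEq] at h; omega
  · rw [pvNbr_1 hc] at h
    split_ifs at h with h1
    · simp only [Option.some.injEq] at h; omega
  · rw [pvNbr_2 hc] at h
    split_ifs at h with h1
    · simp only [Option.some.injEq] at h; omega
  · rw [pvNbr_3 hc] at h
    split_ifs at h with h1
    · simp only [Option.some.injEq] at h; omega

theorem pvNbr_adj {g : List (List Int)} {c d n : Nat} (hc : c < 25) (hd : d < 4)
    (h : pvNbr c d = some n) (hv : pvBgetc g n = pvBgetc g c) : pvAdj g c n := by
  obtain ⟨hn, hs⟩ := pvNbr_shape hc hd h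
  exact ⟨hc, hn, hv.symm, by tauto⟩

theorem pvAdj_nbr {g : List (List Int)} {c n : Nat} (h : pvAdj g c n) :
    ∃ d, d < 4 ∧ pvNbr c d = some n ∧ pvBgetc g n = pvBgetc g c := by
  obtain ⟨hc, hn, hv, hs⟩ := h
  rcases hs with ⟨h1, h2⟩ | ⟨h1, h2⟩ | ⟨h1, h2⟩ | ⟨h1, h2⟩
  · exact ⟨0, by omega, by rw [pvNbr_0 hc, if_pos h2, h1], hv.symm⟩
  · refine ⟨2, by omega, ?_, hv.symm⟩
    rw [pvNbr_2 hc, if_pos (by omega)]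
    simp only [Option.some.injEq]; omega
  · exact ⟨1, by omega, by rw [pvNbr_1 hc, if_pos h2, h1], hv.symm⟩
  · refine ⟨3, by omega, ?_, hv.symm⟩
    rw [pvNbr_3 hc, if_pos (by omega)]
    simp only [Option.some.injEq]; omega

-- ---------- BFS collects exactly the reachable unvisited cells ----------
def pvRE (g : List (List Int)) (vis0 : List Bool) (u v : Nat) : Prop :=
  pvAdj g u v ∧ vis0.getD v true = false

def pvReach (g : List (List Int)) (vis0 : List Bool) (c x : Nat) : Prop :=
  Relation.ReflTransGen (pvRE g vis0) c x

theorem pvExpand_bundle {g : List (List Int)} {vis0 : List Bool} {c0 c : Nat} :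
    ∀ ds dq trace vis,
      (∀ d ∈ ds, d < 4) →
      vis.length = 25 →
      (∀ x, vis.getD x true = (vis0.getD x true || decide (x ∈ trace))) →
      (∀ t ∈ trace, t < 25 ∧ pvReach g vis0 c0 t) →
      (∀ e ∈ dq, e ∈ trace) →
      trace.Nodup →
      c ∈ trace →
      pvReach g vis0 c0 c →
      c < 25 →
      ((pvExpand g c ds dq trace vis).2.2.length = 25 ∧
       (∀ x, (pvExpand g c ds dq trace vis).2.2.getD x true =
         (vis0.getD x true || decide (x ∈ (pvExpand g c ds dq trace vis).2.1))) ∧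
       (∀ t ∈ (pvExpand g c ds dq trace vis).2.1, t < 25 ∧ pvReach g vis0 c0 t) ∧
       (∀ e ∈ (pvExpand g c ds dq trace vis).1, e ∈ (pvExpand g c ds dq trace vis).2.1) ∧
       (pvExpand g c ds dq trace vis).2.1.Nodup ∧
       (∀ x, x ∈ trace → x ∈ (pvExpand g c ds dq trace vis).2.1) ∧
       (∀ x, vis.getD x true = true → (pvExpand g c ds dq trace vis).2.2.getD x true = true) ∧
       (∀ d ∈ ds, ∀ n, pvNbr c d = some n → pvBgetc g n = pvBgetc g c →
         (pvExpand g c ds dq trace vis).2.2.getD n true = true) ∧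
       (∀ e ∈ dq, e ∈ (pvExpand g c ds dq trace vis).1) ∧
       (∀ x ∈ (pvExpand g c ds dq trace vis).2.1, x ∈ trace ∨ x ∈ (pvExpand g c ds dq trace vis).1)) := by
  intro ds
  induction ds with
  | nil =>
    intro dq trace vis _ hlen hvis htr hdq hnd hct hrc hc
    simp only [pvExpand]
    exact ⟨hlen, hvis, htr, hdq, hnd, fun x hx => hx, fun x hx => hx,
      fun d hd => by simp at hd, fun e he => he, fun x hx => Or.inl hx⟩
  | cons d ds' ih =>
    intro dq trace vis hds hlen hvis htr hdq hnd hct hrc hc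
    have hd4 : d < 4 := hds d (by simp)
    have hds' : ∀ e ∈ ds', e < 4 := fun e he => hds e (by simp [he])
    cases hnbr : pvNbr c d with
    | none =>
      simp only [pvExpand, hnbr]
      obtain ⟨r1, r2, r3, r4, r5, r6, r7, r8, r9, r10⟩ :=
        ih dq trace vis hds' hlen hvis htr hdq hnd hct hrc hc
      refine ⟨r1, r2, r3, r4, r5, r6, r7, ?_, r9, r10⟩
      intro e he n hn
      rcases List.mem_cons.mp he with he' | he'
      · subst he'; rw [hnbr] at hn; exact absurd hn (by simp)
      · exact r8 e he' n hn
    | some n =>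
      simp only [pvExpand, hnbr]
      have hn25 : n < 25 := (pvNbr_shape hc hd4 hnbr).1
      by_cases hcond : vis.getD n true = false ∧ pvBgetc g n = pvBgetc g c
      · rw [if_pos hcond]
        have hnvis0 : vis0.getD n true = false ∧ n ∉ trace := by
          have := hvis n
          rw [hcond.1] at this
          constructor
          · cases h0 : vis0.getD n true
            · rfl
            · rw [h0] at this; simp at this
          · intro hmem
            rw [decide_eq_true hmem] at this; simp at this
        have hadj : pvAdj g c n := pvNbr_adj hc hd4 hnbr hcond.2
        have hreach : pvReach g vis0 c0 n := hrc.tail ⟨hadj, hnvis0.1⟩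
        have hlen' : (vis.set n true).length = 25 := by simp [hlen]
        have hvis' : ∀ x, (vis.set n true).getD x true =
            (vis0.getD x true || decide (x ∈ trace ++ [n])) := by
          intro x
          by_cases hx : x = n
          · subst hx
            rw [pvGetD_set_self _ _ _ _ (by omega)]
            simp
          · rw [pvGetD_set_ne _ _ _ _ _ (fun h => hx h.symm), hvis x]
            have : (x ∈ trace ++ [n]) ↔ (x ∈ trace) := by simp [hx]
            rw [decide_eq_decide.mpr this]
        have htr' : ∀ t ∈ trace ++ [n], t < 25 ∧ pvReach g vis0 c0 t := by
          intro t ht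
          rcases List.mem_append.mp ht with h | h
          · exact htr t h
          · simp at h; subst h; exact ⟨hn25, hreach⟩
        have hdq' : ∀ e ∈ dq ++ [n], e ∈ trace ++ [n] := by
          intro e he
          rcases List.mem_append.mp he with h | h
          · exact List.mem_append.mpr (Or.inl (hdq e h))
          · exact List.mem_append.mpr (Or.inr h)
        have hnd' : (trace ++ [n]).Nodup := by
          have hnm : n ∉ trace := hnvis0.2
          simp [List.nodup_append, hnd]
          exact fun a ha h => hnm (h ▸ ha)
        obtain ⟨r1, r2, r3, r4, r5, r6, r7, r8, r9, r10⟩ :=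
          ih (dq ++ [n]) (trace ++ [n]) (vis.set n true) hds' hlen' hvis' htr' hdq' hnd'
            (by simp [hct]) hrc hc
        have hsetmono : ∀ x, vis.getD x true = true → (vis.set n true).getD x true = true := by
          intro x hx
          by_cases hxn : x = n
          · subst hxn; rw [pvGetD_set_self _ _ _ _ (by omega)]
          · rwa [pvGetD_set_ne _ _ _ _ _ (fun h => hxn h.symm)]
        refine ⟨r1, r2, r3, r4, r5,
          fun x hx => r6 x (by simp [hx]),
          fun x hx => r7 x (hsetmono x hx), ?_,
          fun e he => r9 e (by simp [he]), ?_⟩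
        · intro e he m hm hveq
          rcases List.mem_cons.mp he with he' | he'
          · subst he'
            rw [hnbr] at hm
            have hmn : n = m := by simpa using hm
            subst hmn
            exact r7 n (by rw [pvGetD_set_self _ _ _ _ (by omega)])
          · exact r8 e he' m hm hveq
        · intro y hy
          rcases r10 y hy with h | h
          · rcases List.mem_append.mp h with h' | h'
            · exact Or.inl h'
            · simp only [List.mem_singleton] at h'
              subst h'
              exact Or.inr (r9 _ (by simp))
          · exact Or.inr h
      · rw [if_neg hcond]
        obtain ⟨r1, r2, r3, r4, r5, r6, r7, r8, r9, r10⟩ :=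
          ih dq trace vis hds' hlen hvis htr hdq hnd hct hrc hc
        refine ⟨r1, r2, r3, r4, r5, r6, r7, ?_, r9, r10⟩
        intro e he m hm hveq
        rcases List.mem_cons.mp he with he' | he'
        · subst he'
          rw [hnbr] at hm
          have hmn : n = m := by simpa using hm
          subst hmn
          have : vis.getD n true = true := by
            cases h0 : vis.getD n true
            · exact absurd ⟨h0, hveq⟩ hcond
            · rfl
          exact r7 n this
        · exact r8 e he' m hm hveq

theorem pvBfs_spec {g : List (List Int)} {vis0 : List Bool} {c0 : Nat} (hc0 : c0 < 25) :
    ∀ dq trace vis,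
      vis.length = 25 →
      (∀ x, vis.getD x true = (vis0.getD x true || decide (x ∈ trace))) →
      (∀ t ∈ trace, t < 25 ∧ pvReach g vis0 c0 t) →
      (∀ e ∈ dq, e ∈ trace) →
      trace.Nodup →
      c0 ∈ trace →
      (∀ t ∈ trace, t ∉ dq → ∀ n, pvAdj g t n → vis.getD n true = true) →
      ((pvBfs g dq trace vis).1.Nodup ∧
       (∀ x, x ∈ (pvBfs g dq trace vis).1 ↔ pvReach g vis0 c0 x) ∧
       (∀ x, (pvBfs g dq trace vis).2.getD x true =
         (vis0.getD x true || decide (x ∈ (pvBfs g dq trace vis).1))) ∧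
       (pvBfs g dq trace vis).2.length = 25) := by
  intro dq trace vis
  induction dq, trace, vis using pvBfs.induct (g := g) with
  | case1 trace vis =>
    intro hlen hvis htr hdq hnd hc0t hcl
    rw [pvBfs]
    refine ⟨hnd, ?_, hvis, hlen⟩
    intro x
    constructor
    · intro hx; exact (htr x hx).2
    · intro hx
      induction hx with
      | refl => exact hc0t
      | tail hyz hre ihx =>
        have hz := hcl _ ihx (by simp) _ hre.1
        rw [hvis] at hz
        rw [hre.2] at hz
        simpa using hz
  | case2 trace vis c rest r ih =>
    intro hlen hvis htr hdq hnd hc0t hcl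
    rw [pvBfs]
    have hct : c ∈ trace := hdq c (by simp)
    have hc25 : c < 25 := (htr c hct).1
    have hrc : pvReach g vis0 c0 c := (htr c hct).2
    obtain ⟨r1, r2, r3, r4, r5, r6, r7, r8, r9, r10⟩ :=
      pvExpand_bundle (c0 := c0) [0, 1, 2, 3] rest trace vis
        (by intro d hd; fin_cases hd <;> omega)
        hlen hvis htr (fun e he => hdq e (by simp [he])) hnd hct hrc hc25
    exact ih r1 r2 r3 r4 r5
      (r6 c0 hc0t)
      (by
        intro t ht htq n hadj
        rcases r10 t ht with htt | htt
        · by_cases htc : t = c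
          · subst htc
            obtain ⟨d, hd4, hnb, hveq⟩ := pvAdj_nbr hadj
            exact r8 d (by interval_cases d <;> simp) n hnb hveq
          · have htrest : t ∉ rest := fun hr => htq (r9 t hr)
            exact r7 n (hcl t htt (by simp [htc, htrest]) n hadj)
        · exact absurd htt htq)

-- ---------- the zeroed cells are visited, so BFS reads the original board ----------
def pvAgree (gm g : List (List Int)) (vis : List Bool) : Prop :=
  ∀ x, x < 25 → vis.getD x true = false → pvBgetc gm x = pvBgetc g x

theorem pvExpand_congr {gm g : List (List Int)} {c : Nat} (hc : c < 25) :
    ∀ ds dq trace vis,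
      (∀ d ∈ ds, d < 4) →
      pvAgree gm g vis →
      pvBgetc gm c = pvBgetc g c →
      (∀ e ∈ dq, pvBgetc gm e = pvBgetc g e ∧ e < 25) →
      (pvExpand gm c ds dq trace vis = pvExpand g c ds dq trace vis ∧
       (∀ e ∈ (pvExpand g c ds dq trace vis).1, pvBgetc gm e = pvBgetc g e ∧ e < 25) ∧
       pvAgree gm g (pvExpand g c ds dq trace vis).2.2) := by
  intro ds
  induction ds with
  | nil =>
    intro dq trace vis _ hA hc' hdq
    exact ⟨rfl, hdq, hA⟩
  | cons d ds' ih =>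
    intro dq trace vis hds hA hc' hdq
    have hd4 : d < 4 := hds d (by simp)
    have hds' : ∀ e ∈ ds', e < 4 := fun e he => hds e (by simp [he])
    cases hnbr : pvNbr c d with
    | none =>
      simp only [pvExpand, hnbr]
      exact ih dq trace vis hds' hA hc' hdq
    | some n =>
      simp only [pvExpand, hnbr]
      have hn25 : n < 25 := (pvNbr_shape hc hd4 hnbr).1
      by_cases hv : vis.getD n true = false
      · have hgn : pvBgetc gm n = pvBgetc g n := hA n hn25 hv
        have hcond : (vis.getD n true = false ∧ pvBgetc gm n = pvBgetc gm c) ↔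
            (vis.getD n true = false ∧ pvBgetc g n = pvBgetc g c) := by
          constructor
          · rintro ⟨h1, h2⟩; exact ⟨h1, by rw [← hgn, ← hc', h2]⟩
          · rintro ⟨h1, h2⟩; exact ⟨h1, by rw [hgn, hc', h2]⟩
        by_cases hcg : vis.getD n true = false ∧ pvBgetc g n = pvBgetc g c
        · rw [if_pos (hcond.mpr hcg), if_pos hcg]
          have hA' : pvAgree gm g (vis.set n true) := fun x hx hxf =>
            hA x hx (pvSet_true_mono hxf)
          exact ih _ _ _ hds' hA' hc'
            (fun e he => by
              rcases List.mem_append.mp he with h | h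
              · exact hdq e h
              · simp at h; subst h; exact ⟨hgn, hn25⟩)
        · rw [if_neg (fun h => hcg (hcond.mp h)), if_neg hcg]
          exact ih dq trace vis hds' hA hc' hdq
      · have hvt : vis.getD n true = true := by
          cases h0 : vis.getD n true
          · exact absurd h0 hv
          · rfl
        rw [if_neg (by rw [hvt]; rintro ⟨h, -⟩; exact absurd h (by simp)),
            if_neg (by rw [hvt]; rintro ⟨h, -⟩; exact absurd h (by simp))]
        exact ih dq trace vis hds' hA hc' hdq

theorem pvBfs_congr {gm g : List (List Int)} :
    ∀ dq trace vis,
      pvAgree gm g vis →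
      (∀ e ∈ dq, pvBgetc gm e = pvBgetc g e ∧ e < 25) →
      pvBfs gm dq trace vis = pvBfs g dq trace vis := by
  intro dq trace vis
  induction dq, trace, vis using pvBfs.induct (g := gm) with
  | case1 trace vis =>
    intro _ _
    simp only [pvBfs]
  | case2 trace vis c rest r ih =>
    intro hA hdq
    have hc25 : c < 25 := (hdq c (by simp)).2
    obtain ⟨heq, hdq', hA'⟩ :=
      pvExpand_congr (gm := gm) (g := g) hc25 [0, 1, 2, 3] rest trace vis
        (by intro d hd; fin_cases hd <;> omega)
        hA (hdq c (by simp)).1 (fun e he => hdq e (by simp [he]))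
    rw [pvBfs, pvBfs]
    simp only [heq]
    have hr : r = pvExpand g c [0, 1, 2, 3] rest trace vis := heq
    rw [hr] at ih
    exact ih hA' hdq' 

theorem pvBgetc_set_ne {g : List (List Int)} {t x : Nat} (v : Int)
    (ht : t < 25) (hx : x < 25) (hne : t ≠ x) :
    pvBgetc (pvBset g t v) x = pvBgetc g x := by
  unfold pvBgetc pvBset
  by_cases hrow : t / 5 = x / 5
  · by_cases hl : t / 5 < g.length
    · rw [← hrow, pvGetD_set_self _ _ _ _ hl]
      rw [pvGetD_set_ne _ _ _ _ _ (by omega)]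
    · rw [List.set_eq_of_length_le (by omega)]
  · rw [pvGetD_set_ne _ _ _ _ _ hrow]

theorem pvZero_agree :
    ∀ (trace : List Nat) (g : List (List Int)) (x : Nat),
      (∀ t ∈ trace, t < 25) → x < 25 → x ∉ trace →
      pvBgetc (pvZero g trace) x = pvBgetc g x := by
  intro trace
  induction trace with
  | nil => intro g x _ _ _; rfl
  | cons t ts ih =>
    intro g x htr hx hnx
    have : pvZero g (t :: ts) = pvZero (pvBset g t 0) ts := rfl
    rw [this, ih _ _ (fun u hu => htr u (by simp [hu])) hx (fun h => hnx (by simp [h]))]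
    exact pvBgetc_set_ne 0 (htr t (by simp)) hx (fun h => hnx (by simp [h]))

-- ---------- the component a BFS collects is a union-find root class ----------
theorem pvReach_iff_root {g : List (List Int)} {vis : List Bool} {i : Nat}
    (hi : i < 25) (hroot : pvRoot g i = i)
    (hv : ∀ x, x < 25 → vis.getD x true = decide (pvRoot g x < i)) :
    ∀ x, pvReach g (vis.set i true) i x ↔ (x < 25 ∧ pvRoot g x = i) := by
  intro x
  constructor
  · intro h
    induction h with
    | refl => exact ⟨hi, hroot⟩
    | tail hyz hre ihx =>
      refine ⟨hre.1.2.1, ?_⟩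
      have hr := pvAdj_root hre.1
      unfold pvRoot at ihx ⊢
      rw [← hr]
      exact ihx.2
  · rintro ⟨hx25, hxr⟩
    have hconn : pvConn g i x := by
      refine (pvConn_iff_root hi hx25).mpr ?_
      unfold pvRoot at hroot hxr
      rw [hroot, hxr]
    clear hxr hx25
    induction hconn with
    | refl => exact Relation.ReflTransGen.refl
    | tail hyz hadj ihy =>
      rename_i y z
      by_cases hzi : z = i
      · subst hzi; exact Relation.ReflTransGen.refl
      · have hz25 : z < 25 := hadj.2.1
        have hrz : pvRoot g z = i := by
          have hcz : pvConn g i z := hyz.tail hadj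
          have h2 := (pvConn_iff_root hi hz25).mp hcz
          unfold pvRoot at hroot ⊢
          rw [← h2, hroot]
        have hvz : (vis.set i true).getD z true = false := by
          rw [pvGetD_set_ne _ _ _ _ _ (fun h => hzi h.symm), hv z hz25, hrz]
          simp
        exact ihy.tail ⟨hadj, hvz⟩

theorem pvTraceLen {l : List Nat} (hnd : l.Nodup) (i : Nat) (g : List (List Int))
    (hmem : ∀ x, x ∈ l ↔ (x < 25 ∧ pvRoot g x = i)) :
    l.length = pvSizeOf g i := by
  apply List.Perm.length_eq
  rw [List.perm_ext_iff_of_nodup hnd (List.Nodup.filter _ List.nodup_range)]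
  intro a
  rw [hmem a, List.mem_filter, List.mem_range]
  simp

def pvF (g0 : List (List Int)) (sc r : Nat) : Nat :=
  if pvRoot g0 r = r ∧ 3 ≤ pvSizeOf g0 r then sc + pvSizeOf g0 r else sc

theorem pvFoldl_shift :
    ∀ (g0 : List (List Int)) (l : List Nat) (z a : Nat),
      l.foldl (pvF g0) (z + a) = l.foldl (pvF g0) z + a := by
  intro g0 l
  induction l with
  | nil => intros; rfl
  | cons b t ih =>
    intro z a
    simp only [List.foldl_cons]
    have : pvF g0 (z + a) b = pvF g0 z b + a := by unfold pvF; split_ifs <;> omega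
    rw [this, ih]

theorem pvOuter_spec (g0 : List (List Int)) :
    ∀ (k i : Nat) (g : List (List Int)) (vis : List Bool) (score : Int),
      i + k = 25 →
      vis.length = 25 →
      (∀ x, x < 25 → vis.getD x true = decide (pvRoot g0 x < i)) →
      pvAgree g g0 vis →
      pvOuterA g (List.range' i k) vis score =
        score + ((List.range' i k).foldl (pvF g0) 0 : Nat) := by
  intro k
  induction k with
  | zero =>
    intro i g vis score hik hlen hv hA
    simp [pvOuterA]
  | succ k ih =>
    intro i g vis score hik hlen hv hA
    have hi25 : i < 25 := by omega
    rw [List.range'_succ]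
    simp only [pvOuterA]
    by_cases hvi : pvRoot g0 i < i
    · have hvt : vis.getD i true = true := by rw [hv i hi25]; simp [hvi]
      rw [if_neg (by rw [hvt]; simp)]
      have hv' : ∀ x, x < 25 → vis.getD x true = decide (pvRoot g0 x < i + 1) := by
        intro x hx
        rw [hv x hx]
        refine decide_eq_decide.mpr ?_
        have hne : pvRoot g0 x ≠ i := by
          intro h
          have := pvRoot_idem' (g := g0) hx
          rw [h] at this
          omega
        omega
      rw [ih (i + 1) g vis score (by omega) hlen hv' hA]
      have hstep : pvF g0 0 i = 0 := by
        unfold pvF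
        rw [if_neg]
        rintro ⟨h1, -⟩
        omega
      simp [List.foldl_cons, hstep]
    · have hroot : pvRoot g0 i = i := by
        have := pvRoot_le (g := g0) hi25
        unfold pvRoot at *
        omega
      have hvf : vis.getD i true = false := by rw [hv i hi25]; simp [hvi]
      rw [if_pos hvf]
      have hA1 : pvAgree g g0 (vis.set i true) := fun x hx hxf => hA x hx (pvSet_true_mono hxf)
      have hgeq : pvBfs g [i] [i] (vis.set i true) = pvBfs g0 [i] [i] (vis.set i true) :=
        pvBfs_congr _ _ _ hA1
          (by
            intro e he
            simp only [List.mem_singleton] at he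
            subst he
            exact ⟨hA _ hi25 hvf, hi25⟩)
      rw [hgeq]
      obtain ⟨hnd, hmem, hvc, hlen'⟩ :=
        pvBfs_spec (g := g0) (vis0 := vis.set i true) hi25 [i] [i] (vis.set i true)
          (by simp [hlen])
          (by
            intro x
            by_cases hx : x = i
            · subst hx
              rw [pvGetD_set_self _ _ _ _ (by omega)]
              simp
            · simp [hx])
          (by
            intro t ht
            simp only [List.mem_singleton] at ht
            subst ht
            exact ⟨hi25, Relation.ReflTransGen.refl⟩)
          (fun e he => he)
          (List.nodup_singleton i)
          (by simp)
          (by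
            intro t ht htq
            exact absurd ht htq)
      set r := pvBfs g0 [i] [i] (vis.set i true) with hrdef
      have hmem' : ∀ x, x ∈ r.1 ↔ (x < 25 ∧ pvRoot g0 x = i) := by
        intro x
        rw [hmem x, pvReach_iff_root hi25 hroot hv]
      have hlenr : r.1.length = pvSizeOf g0 i := pvTraceLen hnd i g0 hmem'
      have hvc' : ∀ x, x < 25 → r.2.getD x true = decide (pvRoot g0 x < i + 1) := by
        intro x hx
        rw [hvc x]
        by_cases hxi : x = i
        · subst hxi
          rw [pvGetD_set_self _ _ _ _ (by omega)]
          simp [hroot]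
        · rw [pvGetD_set_ne _ _ _ _ _ (fun h => hxi h.symm), hv x hx]
          by_cases hm : x ∈ r.1
          · have hmm := (hmem' x).mp hm
            rw [decide_eq_true hm]
            simp [hmm.2]
          · have hne : pvRoot g0 x ≠ i := fun h => hm ((hmem' x).mpr ⟨hx, h⟩)
            rw [decide_eq_false hm]
            simp only [Bool.or_false]
            exact decide_eq_decide.mpr (by omega)
      have hvisfalse : ∀ x, x < 25 → r.2.getD x true = false →
          vis.getD x true = false ∧ x ∉ r.1 := by
        intro x hx hxf
        have h0 := hvc x
        rw [hxf] at h0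
        have hset : (vis.set i true).getD x true = false := by
          cases hs : (vis.set i true).getD x true
          · rfl
          · rw [hs] at h0; simp at h0
        have hnm : x ∉ r.1 := by
          intro hm
          rw [decide_eq_true hm] at h0
          simp at h0
        exact ⟨pvSet_true_mono hset, hnm⟩
      by_cases h3 : 3 ≤ r.1.length
      · rw [if_pos h3]
        have htl : ∀ t ∈ r.1, t < 25 := fun t ht => ((hmem' t).mp ht).1
        have hA' : pvAgree (pvZero g r.1) g0 r.2 := by
          intro x hx hxf
          obtain ⟨hvx, hxm⟩ := hvisfalse x hx hxf
          rw [pvZero_agree r.1 g x htl hx hxm]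
          exact hA x hx hvx
        rw [ih (i + 1) _ _ _ (by omega) hlen' hvc' hA']
        rw [hlenr]
        have hstep : (i :: List.range' (i + 1) k).foldl (pvF g0) 0 =
            (List.range' (i + 1) k).foldl (pvF g0) 0 + pvSizeOf g0 i := by
          simp only [List.foldl_cons]
          have h1 : pvF g0 0 i = 0 + pvSizeOf g0 i := by
            unfold pvF
            rw [if_pos ⟨hroot, by rw [← hlenr]; exact h3⟩]
          rw [h1, pvFoldl_shift]
        rw [hstep]
        push_cast
        ring
      · rw [if_neg h3]
        have hA' : pvAgree g g0 r.2 := by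
          intro x hx hxf
          exact hA x hx (hvisfalse x hx hxf).1
        rw [ih (i + 1) _ _ _ (by omega) hlen' hvc' hA']
        have hstep : pvF g0 0 i = 0 := by
          unfold pvF
          rw [if_neg]
          rintro ⟨-, hs⟩
          rw [← hlenr] at hs
          exact h3 hs
        simp [List.foldl_cons, hstep]

-- ===== VERDICT (by name: the statement is the Claim_ definition above) =====
theorem get_artifacts_spec : Claim_equal_get_artifacts := by
  intro board hdom hpre
  unfold Spec_get_artifacts
  unfold get_artifacts
  rw [List.range_eq_range']
  rw [pvOuter_spec board 25 0 board (List.replicate 25 false) 0 (by omega) (by simp)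
      (by
        intro x hx
        rw [List.getD_eq_getElem?_getD, List.getElem?_replicate]
        simp [hx])
      (fun x hx hf => rfl)]
  rw [pvAlt_eq]
  have hfold : (List.range' 0 25).foldl (pvF board) 0 =
      (List.range 25).foldl
        (fun sc r => if 3 ≤ pvSizeOf board r then sc + pvSizeOf board r else sc) 0 := by
    rw [← List.range_eq_range']
    refine pvFoldl_congr _ _ _ _ (fun sc r hr => ?_)
    have hr25 : r < 25 := by simpa using hr
    unfold pvF
    by_cases hro : pvRoot board r = r
    · by_cases h3 : 3 ≤ pvSizeOf board r
      · rw [if_pos ⟨hro, h3⟩, if_pos h3]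
      · rw [if_neg (fun h => h3 h.2), if_neg h3]
    · have hz := pvSizeOf_nonroot hr25 hro
      rw [if_neg (fun h => hro h.1), hz]
      simp
  rw [hfold]
  simp
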